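-- pv_equiv track=rewrite | github.com/oltapllana/golf-sudoku-latin-ai | detyra3.py | iddfs_dls
-- ===== SOURCE A (Python) =====
-- def iddfs_dls(grid, row_sets, col_sets, cell_index, depth_limit, n):
--     """
--     Performs Depth-Limited Search (DLS) for IDDFS.
--
--     Parameters:
--         grid (list): The current state of the Latin Square grid.
--         row_sets (list): List of sets tracking used numbers in each row.
--         col_sets (list): List of sets tracking used numbers in each column.
--         cell_index (int): The current cell index being filled (0 to n*n - 1).
--         depth_limit (int): The current depth limit for IDDFS.
--         n (int): The order of the Latin Square.
--
--     Returns: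
--         bool: True if a solution is found, else False.
--     """
--
--     if cell_index == n * n:
--         return True
--
--
--     if cell_index >= depth_limit:
--         return False
--
--
--     row = cell_index // n
--     col = cell_index % n
--
--     for num in range(1, n + 1):
--
--         if num not in row_sets[row] and num not in col_sets[col]:
--
--             grid[row][col] = num
--
--             row_sets[row].add(num)
--             col_sets[col].add(num)
--
--             if iddfs_dls(grid, row_sets, col_sets, cell_index + 1, depth_limit, n):
--                 return True
--
--             grid[row][col] = 0
--             row_sets[row].remove(num)
--             col_sets[col].remove(num)
--
--     return False
-- ===== SOURCE B (Python) =====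
-- def iddfs_dls(grid, row_sets, col_sets, cell_index, depth_limit, n):
--     """Iterative depth-limited backtracking with an explicit stack (pure:
--     computes the same return value as the recursive version without mutating
--     grid/row_sets/col_sets)."""
--     if cell_index == n * n:
--         return True
--     if cell_index >= depth_limit:
--         return False
--     rows = list(row_sets)
--     cols = list(col_sets)
--     stack = []          # per filled cell: (num placed, saved row set, saved col set)
--     next_num = 1
--     while True:
--         cur = cell_index + len(stack)
--         if cur == n * n:
--             return True
--         if cur < depth_limit:
--             row, col = divmod(cur, n)
--             num = next_num
--             while num <= n and (num in rows[row] or num in cols[col]):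
--                 num += 1
--         else:
--             num = n + 1                     # depth cutoff: no candidate here
--         if num <= n:                        # place num and move to the next cell
--             stack.append((num, rows[row], cols[col]))
--             rows[row] = rows[row] | {num}
--             cols[col] = cols[col] | {num}
--             next_num = 1
--         else:                               # no candidate left: backtrack
--             if not stack:
--                 return False
--             num, rs_prev, cs_prev = stack.pop()
--             cur = cell_index + len(stack)
--             row, col = divmod(cur, n)
--             rows[row] = rs_prev
--             cols[col] = cs_prev
--             next_num = num + 1
-- ===== Notes on version B (the rewrite author's own statement) =====
-- stated objective: alternative
-- what changed: The recursive depth-limited backtracking (one Python stack frame per cell, candidate loop with in-place add/undo) is replaced by an iterative search loop over an explicit stack of (placed number, saved row set, saved col set) frames, with a resume counter for the next candidate to try; B is pure (it does not mutate grid/row_sets/col_sets), and the equivalence is about the returned bool.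
-- outside the precondition, e.g. on iddfs_dls([[0]], [set()], [set()], -1, 1, 1): A returns False, B returns False; on iddfs_dls([], [{1, 2}, set()], [set(), set()], 0, 4, 2): A returns False, B returns False
import Mathlib
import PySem

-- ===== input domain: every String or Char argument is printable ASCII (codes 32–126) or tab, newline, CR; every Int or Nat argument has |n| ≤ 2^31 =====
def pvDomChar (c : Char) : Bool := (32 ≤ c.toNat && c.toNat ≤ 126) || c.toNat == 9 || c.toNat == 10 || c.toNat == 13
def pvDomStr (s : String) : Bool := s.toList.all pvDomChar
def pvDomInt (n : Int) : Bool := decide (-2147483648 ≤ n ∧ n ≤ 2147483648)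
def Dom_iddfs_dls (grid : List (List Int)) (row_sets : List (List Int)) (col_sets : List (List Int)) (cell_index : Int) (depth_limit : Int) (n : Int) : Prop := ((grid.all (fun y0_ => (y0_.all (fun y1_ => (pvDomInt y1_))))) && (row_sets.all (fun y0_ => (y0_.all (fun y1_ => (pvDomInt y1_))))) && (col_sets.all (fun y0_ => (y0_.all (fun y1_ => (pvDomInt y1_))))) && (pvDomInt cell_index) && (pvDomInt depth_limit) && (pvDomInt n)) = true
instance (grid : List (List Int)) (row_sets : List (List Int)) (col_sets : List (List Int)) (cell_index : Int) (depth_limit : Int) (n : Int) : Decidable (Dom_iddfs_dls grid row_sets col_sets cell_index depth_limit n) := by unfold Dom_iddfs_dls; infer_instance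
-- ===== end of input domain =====

-- B replaces A's recursive backtracking by an iterative loop over an explicit stack of
-- (number, saved row set, saved col set) frames; equivalence is about the RETURN VALUE only
-- (A mutates grid/row_sets/col_sets in place, B does not mutate its arguments).

-- ===== PORT A =====
-- Literal port of A's recursion. The (row_sets, col_sets) state is threaded functionally:
-- the child call receives the sets after 'add(num)'; because A always performs the matching
-- 'remove(num)' before trying the next candidate, the state for the next loop iteration is
-- exactly the original rs/cs, which is what the port passes on. grid is written but never
-- read by A, so it cannot influence the returned bool and is not threaded.
-- The Nat fuel only makes the recursion structural; iddfs_dls passes enough for every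
-- input the claim covers ((n*n - cell_index).toNat + 1 levels).
mutual
def iddfsGo (f : Nat) (rs cs : List (List Int)) (cell dl n : Int) : Bool :=
  if cell = n * n then true
  else if dl ≤ cell then false
  else
    match f with
    | 0 => false
    | f' + 1 => iddfsTry f' rs cs cell dl n (PySem.List.pyRange 1 (n + 1) 1)
  termination_by (f, 1, 0)

def iddfsTry (f : Nat) (rs cs : List (List Int)) (cell dl n : Int) : List Int → Bool
  | [] => false
  | num :: rest =>
    let row := PySem.Int.floordiv cell n
    let col := PySem.Int.mod cell n
    let rset := PySem.List.pyGetD rs row []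
    let cset := PySem.List.pyGetD cs col []
    if !(rset.contains num) && !(cset.contains num) then
      if iddfsGo f (PySem.List.pySetD rs row (PySem.Set.add rset num))
                   (PySem.List.pySetD cs col (PySem.Set.add cset num)) (cell + 1) dl n
      then true
      else iddfsTry f rs cs cell dl n rest
    else iddfsTry f rs cs cell dl n rest
  termination_by nums => (f, 2, nums.length)
end

def iddfs_dls (grid : List (List Int)) (row_sets : List (List Int)) (col_sets : List (List Int)) (cell_index : Int) (depth_limit : Int) (n : Int) : Bool :=
  iddfsGo ((n * n - cell_index).toNat + 1) row_sets col_sets cell_index depth_limit n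

-- ===== PORT B =====
-- Port of Source B. altScan is the inner 'while num <= n and (num in rows[row] or num in cols[col])'
-- loop (returns the final value of num); altLoop is the outer 'while True' loop with the
-- explicit stack (top of the stack at the head of the list). 'rows[row] | {num}' is
-- PySem.Set.union rset [num] (exact as a set). The Nat fuel only makes the loop structural;
-- iddfs_dls_alt passes enough for every input the claim covers.
def altScan (rows cols : List (List Int)) (row col : Int) (n : Int) (num : Int) : Int :=
  if h : num ≤ n then
    if (PySem.List.pyGetD rows row []).contains num || (PySem.List.pyGetD cols col []).contains num
    then altScan rows cols row col n (num + 1)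
    else num
  else num
termination_by (n + 1 - num).toNat
decreasing_by simp_wf; omega

def altLoop (fuel : Nat) (rows cols : List (List Int)) (stack : List (Int × List Int × List Int)) (next_num : Int) (cell dl n : Int) : Bool :=
  match fuel with
  | 0 => false
  | f + 1 =>
    let cur : Int := cell + stack.length
    if cur = n * n then true
    else
      let num := if cur < dl then altScan rows cols (PySem.Int.floordiv cur n) (PySem.Int.mod cur n) n next_num else n + 1
      if num ≤ n then
        let row := PySem.Int.floordiv cur n
        let col := PySem.Int.mod cur n
        let rset := PySem.List.pyGetD rows row []
        let cset := PySem.List.pyGetD cols col []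
        altLoop f (PySem.List.pySetD rows row (PySem.Set.union rset [num]))
                  (PySem.List.pySetD cols col (PySem.Set.union cset [num]))
                  ((num, rset, cset) :: stack) 1 cell dl n
      else
        match stack with
        | [] => false
        | (num', rsPrev, csPrev) :: rest =>
          let cur' : Int := cell + rest.length
          altLoop f (PySem.List.pySetD rows (PySem.Int.floordiv cur' n) rsPrev)
                    (PySem.List.pySetD cols (PySem.Int.mod cur' n) csPrev)
                    rest (num' + 1) cell dl n

def iddfs_dls_alt (grid : List (List Int)) (row_sets : List (List Int)) (col_sets : List (List Int)) (cell_index : Int) (depth_limit : Int) (n : Int) : Bool :=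
  if cell_index = n * n then true
  else if depth_limit ≤ cell_index then false
  else altLoop (2 * (n.toNat + 2) ^ ((min depth_limit (n * n) - cell_index).toNat + 1) + 1)
               row_sets col_sets [] 1 cell_index depth_limit n

-- ===== PRECONDITION & SPEC =====
-- Pre_ restricts to A's natural domain: either A returns by one of its first two checks, or
-- n < 0 (the candidate range is empty), or 0 ≤ cell_index ≤ n*n with containers of length
-- ≥ n. Outside it A variously raises (IndexError/ZeroDivisionError) or returns values by
-- accident of Python indexing (negative cell_index wraps, a too-short grid/row_sets is only
-- noticed if the search happens to reach it); the two cited excluded inputs are of that kind.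
def Pre_iddfs_dls (grid : List (List Int)) (row_sets : List (List Int)) (col_sets : List (List Int)) (cell_index : Int) (depth_limit : Int) (n : Int) : Prop :=
  cell_index = n * n ∨ depth_limit ≤ cell_index ∨ n < 0 ∨
  (0 < n ∧ 0 ≤ cell_index ∧ cell_index ≤ n * n ∧
   n ≤ (row_sets.length : Int) ∧ n ≤ (col_sets.length : Int) ∧
   n ≤ (grid.length : Int) ∧ ∀ r ∈ grid.take n.toNat, n ≤ (r.length : Int))
instance (grid : List (List Int)) (row_sets : List (List Int)) (col_sets : List (List Int)) (cell_index : Int) (depth_limit : Int) (n : Int) : Decidable (Pre_iddfs_dls grid row_sets col_sets cell_index depth_limit n) := by unfold Pre_iddfs_dls; infer_instance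

def pvWitness_iddfs_dls : List (List Int) × List (List Int) × List (List Int) × Int × Int × Int :=
  ([[0]], [[]], [[]], 0, 1, 1)

def Spec_iddfs_dls (grid : List (List Int)) (row_sets : List (List Int)) (col_sets : List (List Int)) (cell_index : Int) (depth_limit : Int) (n : Int) (out : Bool) : Prop := out = iddfs_dls_alt grid row_sets col_sets cell_index depth_limit n
instance (grid : List (List Int)) (row_sets : List (List Int)) (col_sets : List (List Int)) (cell_index : Int) (depth_limit : Int) (n : Int) (out : Bool) : Decidable (Spec_iddfs_dls grid row_sets col_sets cell_index depth_limit n out) := by unfold Spec_iddfs_dls; infer_instance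

-- ===== CLAIM (what is proved, stated in full; the proofs are below) =====
def Claim_equal_iddfs_dls : Prop := ∀ (grid : List (List Int)) (row_sets : List (List Int)) (col_sets : List (List Int)) (cell_index : Int) (depth_limit : Int) (n : Int), Dom_iddfs_dls grid row_sets col_sets cell_index depth_limit n → Pre_iddfs_dls grid row_sets col_sets cell_index depth_limit n → Spec_iddfs_dls grid row_sets col_sets cell_index depth_limit n (iddfs_dls grid row_sets col_sets cell_index depth_limit n)

-- ===== LEMMAS AND PROOFS =====

def pushR (rows : List (List Int)) (cur n num : Int) : List (List Int) :=
  PySem.List.pySetD rows (PySem.Int.floordiv cur n)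
    (PySem.Set.add (PySem.List.pyGetD rows (PySem.Int.floordiv cur n) []) num)
def pushC (cols : List (List Int)) (cur n num : Int) : List (List Int) :=
  PySem.List.pySetD cols (PySem.Int.mod cur n)
    (PySem.Set.add (PySem.List.pyGetD cols (PySem.Int.mod cur n) []) num)
def frameRes (rows cols : List (List Int)) (cur dl n : Int) (next : Int) : Bool :=
  if cur = n * n then true
  else if dl ≤ cur then false
  else iddfsTry ((n * n - (cur + 1)).toNat + 1) rows cols cur dl n (PySem.List.pyRange next (n + 1) 1)
lemma go_eq_frame (rows cols : List (List Int)) (cur dl n : Int) (h : cur ≤ n * n) :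
    iddfsGo ((n * n - cur).toNat + 1) rows cols cur dl n = frameRes rows cols cur dl n 1 := by
  rw [iddfsGo, frameRes]
  split_ifs with h1 h2
  · rfl
  · rfl
  · have e : (n * n - cur).toNat = (n * n - (cur + 1)).toNat + 1 := by omega
    rw [e]
lemma scan_ge (rows cols : List (List Int)) (row col n num : Int) :
    num ≤ altScan rows cols row col n num := by
  fun_induction altScan rows cols row col n num with
  | case1 num h hm ih => omega
  | case2 num h hm => omega
  | case3 num h => omega
lemma restore_set (xs : List (List Int)) (i : Int) (v : List Int) (h : 0 ≤ i) :
    PySem.List.pySetD (PySem.List.pySetD xs i v) i (PySem.List.pyGetD xs i []) = xs := by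
  by_cases hlt : i < (xs.length : Int)
  · rw [PySem.List.pySetD_of_nonneg xs v h, PySem.List.pySetD_of_nonneg _ _ h,
        PySem.List.pyGetD_eq_getElem xs [] h hlt, List.set_set,
        List.set_getElem_self (by omega)]
  · have hlen : xs.length ≤ i.toNat := by omega
    rw [PySem.List.pySetD_of_nonneg xs v h, List.set_eq_of_length_le hlen,
        PySem.List.pySetD_of_nonneg xs _ h, List.set_eq_of_length_le hlen]

lemma try_scan (rows cols : List (List Int)) (cur dl n : Int) (hcur : cur < n * n) :
    ∀ (next : Int),
    iddfsTry ((n * n - (cur + 1)).toNat + 1) rows cols cur dl n (PySem.List.pyRange next (n + 1) 1)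
    = (if altScan rows cols (PySem.Int.floordiv cur n) (PySem.Int.mod cur n) n next ≤ n then
        (if frameRes (pushR rows cur n (altScan rows cols (PySem.Int.floordiv cur n) (PySem.Int.mod cur n) n next))
                     (pushC cols cur n (altScan rows cols (PySem.Int.floordiv cur n) (PySem.Int.mod cur n) n next))
                     (cur + 1) dl n 1
         then true
         else iddfsTry ((n * n - (cur + 1)).toNat + 1) rows cols cur dl n
                (PySem.List.pyRange (altScan rows cols (PySem.Int.floordiv cur n) (PySem.Int.mod cur n) n next + 1) (n + 1) 1))
       else false) := by
  intro next
  induction hk : (n + 1 - next).toNat using Nat.strong_induction_on generalizing next with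
  | _ k ih =>
  subst hk
  by_cases hle : next ≤ n
  · by_cases hmem : (((PySem.List.pyGetD rows (PySem.Int.floordiv cur n) []).contains next
                      || (PySem.List.pyGetD cols (PySem.Int.mod cur n) []).contains next) = true)
    · -- candidate next blocked: both sides move on to next+1
      have hsc : altScan rows cols (PySem.Int.floordiv cur n) (PySem.Int.mod cur n) n next
               = altScan rows cols (PySem.Int.floordiv cur n) (PySem.Int.mod cur n) n (next + 1) := by
        rw [altScan, dif_pos hle, if_pos hmem]
      rw [hsc, PySem.List.pyRange_one_cons (by omega), iddfsTry]
      have hcond : ((!(PySem.List.pyGetD rows (PySem.Int.floordiv cur n) []).contains next)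
                    && (!(PySem.List.pyGetD cols (PySem.Int.mod cur n) []).contains next)) = false := by
        rw [← Bool.not_or, hmem]; rfl
      simp only [hcond, if_false, Bool.false_eq_true]
      exact ih ((n + 1 - (next + 1)).toNat) (by omega) (next + 1) rfl
    · -- candidate next free: the scan stops at next, A recurses into the child
      have hsc : altScan rows cols (PySem.Int.floordiv cur n) (PySem.Int.mod cur n) n next = next := by
        rw [altScan, dif_pos hle, if_neg hmem]
      rw [hsc, if_pos hle, PySem.List.pyRange_one_cons (by omega), iddfsTry]
      have hmem' : ((PySem.List.pyGetD rows (PySem.Int.floordiv cur n) []).contains next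
                    || (PySem.List.pyGetD cols (PySem.Int.mod cur n) []).contains next) = false := by
        simpa using hmem
      have hcond : ((!(PySem.List.pyGetD rows (PySem.Int.floordiv cur n) []).contains next)
                    && (!(PySem.List.pyGetD cols (PySem.Int.mod cur n) []).contains next)) = true := by
        rw [← Bool.not_or, hmem']; rfl
      simp only [hcond, if_true]
      rw [go_eq_frame _ _ _ _ _ (by omega : cur + 1 ≤ n * n)]
      rfl
  · have hsc : altScan rows cols (PySem.Int.floordiv cur n) (PySem.Int.mod cur n) n next = next := by
      rw [altScan, dif_neg hle]
    rw [hsc, if_neg hle, PySem.List.pyRange_one_eq_nil (by omega), iddfsTry]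
def chainRes (cell dl n : Int) : List (Int × List Int × List Int) → List (List Int) → List (List Int) → Int → Bool
  | [], rows, cols, next => frameRes rows cols cell dl n next
  | (num, rsP, csP) :: rest, rows, cols, next =>
    if frameRes rows cols (cell + rest.length + 1) dl n next then true
    else chainRes cell dl n rest
      (PySem.List.pySetD rows (PySem.Int.floordiv (cell + rest.length) n) rsP)
      (PySem.List.pySetD cols (PySem.Int.mod (cell + rest.length) n) csP) (num + 1)

lemma chain_step (cell dl n : Int) (stack : List (Int × List Int × List Int)) (rows cols : List (List Int)) (next : Int) :
    chainRes cell dl n stack rows cols next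
    = (if frameRes rows cols (cell + stack.length) dl n next then true
       else match stack with
         | [] => false
         | (num', rsP, csP) :: rest =>
            chainRes cell dl n rest
              (PySem.List.pySetD rows (PySem.Int.floordiv (cell + rest.length) n) rsP)
              (PySem.List.pySetD cols (PySem.Int.mod (cell + rest.length) n) csP) (num' + 1)) := by
  cases stack with
  | nil =>
    simp only [chainRes, List.length_nil, Nat.cast_zero, add_zero]
    cases h : frameRes rows cols cell dl n next <;> simp_all
  | cons top rest =>
    obtain ⟨num', rsP, csP⟩ := top
    have e : (cell + ((rest.length + 1 : Nat) : Int)) = cell + rest.length + 1 := by push_cast; ring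
    simp only [chainRes, List.length_cons, e]

def wB (n e : Int) : Nat := if 0 ≤ e then (n.toNat + 2) ^ e.toNat else 0
def framesM (n d : Int) : List (Int × List Int × List Int) → Int → Nat
  | [], _ => 0
  | (num, _, _) :: rest, cur => (n + 1 - num).toNat * wB n (d - cur - 1) + framesM n d rest (cur - 1)
def Mfun (cell dl n : Int) (stack : List (Int × List Int × List Int)) (next : Int) : Nat :=
  2 * ((n + 2 - next).toNat * wB n (min dl (n * n) - (cell + stack.length) - 1)
       + framesM n (min dl (n * n)) stack (cell + stack.length - 1)) + stack.length

lemma wB_pos (n e : Int) (h : 0 ≤ e) : 0 < wB n e := by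
  rw [wB, if_pos h]; positivity

lemma wB_succ (n e : Int) (h : 0 ≤ e) : wB n (e + 1) = (n.toNat + 2) * wB n e := by
  rw [wB, wB, if_pos h, if_pos (by omega)]
  have : (e + 1).toNat = e.toNat + 1 := by omega
  rw [this, pow_succ, Nat.mul_comm]

lemma Mfun_pop (cell dl n : Int) (num' : Int) (rsP csP : List Int)
    (rest : List (Int × List Int × List Int)) (next : Int) :
    Mfun cell dl n rest (num' + 1) < Mfun cell dl n ((num', rsP, csP) :: rest) next := by
  unfold Mfun
  simp only [framesM, List.length_cons]
  have e0 : ((rest.length + 1 : Nat) : Int) = (rest.length : Int) + 1 := by push_cast; ring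
  rw [e0]
  have e1 : (n + 2 - (num' + 1)).toNat = (n + 1 - num').toNat := by omega
  have e2 : (cell + ((rest.length : Int) + 1) - 1) = cell + rest.length := by ring
  have e3 : (min dl (n * n) - (cell + (rest.length : Int)) - 1)
          = (min dl (n * n) - (cell + ((rest.length : Int) + 1) - 1) - 1) := by ring
  rw [e1, e2, e3]
  omega

lemma Mfun_push (cell dl n : Int) (num : Int) (rsP csP : List Int)
    (stack : List (Int × List Int × List Int)) (next : Int)
    (hn : 0 < n) (h1 : 1 ≤ next) (h2 : next ≤ n + 1) (hnum1 : next ≤ num) (hnum2 : num ≤ n)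
    (hcd : cell + stack.length < dl) (hcn : cell + stack.length < n * n) :
    Mfun cell dl n ((num, rsP, csP) :: stack) 1 < Mfun cell dl n stack next := by
  unfold Mfun
  simp only [framesM, List.length_cons]
  have e0 : ((stack.length + 1 : Nat) : Int) = (stack.length : Int) + 1 := by push_cast; ring
  rw [e0]
  set cur : Int := cell + (stack.length : Int) with hcur
  set d : Int := min dl (n * n) with hd
  have hcurd : cur < d := by omega
  have e2 : (cell + ((stack.length : Int) + 1) - 1) = cur := by rw [hcur]; ring
  have e3 : (d - (cell + ((stack.length : Int) + 1)) - 1) = d - cur - 2 := by rw [hcur]; ring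
  have e4 : (d - cur - 1) = (d - cur - 2) + 1 := by ring
  rw [e2, e3]
  -- remaining: 2*((n+2-1).toNat * wB n (d-cur-2) + ((n+1-num).toNat * wB n (d-cur-1) + F)) + (L+1)
  --          < 2*((n+2-next).toNat * wB n (d-cur-1) + F) + L
  have hco : (n + 2 - 1).toNat = n.toNat + 1 := by omega
  rw [hco]
  by_cases hdeep : 0 ≤ d - cur - 2
  · have hw : wB n (d - cur - 1) = (n.toNat + 2) * wB n (d - cur - 2) := by
      rw [e4]; exact wB_succ n _ hdeep
    have hw2 : 0 < wB n (d - cur - 2) := wB_pos n _ hdeep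
    rw [hw]
    have hb : (n + 1 - num).toNat + 1 ≤ (n + 2 - next).toNat := by omega
    set w2 := wB n (d - cur - 2)
    set a := (n + 2 - next).toNat
    set b := (n + 1 - num).toNat
    set F := framesM n d stack (cur - 1)
    nlinarith [Nat.mul_le_mul_right ((n.toNat + 2) * w2) hb]
  · have hw2 : wB n (d - cur - 2) = 0 := by rw [wB, if_neg hdeep]
    have hw1 : wB n (d - cur - 1) = 1 := by
      have : d - cur - 1 = 0 := by omega
      rw [this, wB]; norm_num
    rw [hw1, hw2]
    have hb : (n + 1 - num).toNat + 1 ≤ (n + 2 - next).toNat := by omega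
    omega
lemma union_singleton (s : List Int) (x : Int) :
    PySem.Set.union s [x] = PySem.Set.add s x := rfl

lemma alt_step (f : Nat) (rows cols : List (List Int)) (stack : List (Int × List Int × List Int)) (next cell dl n : Int) :
    altLoop (f + 1) rows cols stack next cell dl n
    = (if (cell + (stack.length : Int)) = n * n then true
       else
         if (if (cell + (stack.length : Int)) < dl then
               altScan rows cols (PySem.Int.floordiv (cell + (stack.length : Int)) n) (PySem.Int.mod (cell + (stack.length : Int)) n) n next
             else n + 1) ≤ n then
           altLoop f
             (PySem.List.pySetD rows (PySem.Int.floordiv (cell + (stack.length : Int)) n)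
               (PySem.Set.union (PySem.List.pyGetD rows (PySem.Int.floordiv (cell + (stack.length : Int)) n) [])
                 [(if (cell + (stack.length : Int)) < dl then
                     altScan rows cols (PySem.Int.floordiv (cell + (stack.length : Int)) n) (PySem.Int.mod (cell + (stack.length : Int)) n) n next
                   else n + 1)]))
             (PySem.List.pySetD cols (PySem.Int.mod (cell + (stack.length : Int)) n)
               (PySem.Set.union (PySem.List.pyGetD cols (PySem.Int.mod (cell + (stack.length : Int)) n) [])
                 [(if (cell + (stack.length : Int)) < dl then
                     altScan rows cols (PySem.Int.floordiv (cell + (stack.length : Int)) n) (PySem.Int.mod (cell + (stack.length : Int)) n) n next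
                   else n + 1)]))
             (((if (cell + (stack.length : Int)) < dl then
                  altScan rows cols (PySem.Int.floordiv (cell + (stack.length : Int)) n) (PySem.Int.mod (cell + (stack.length : Int)) n) n next
                else n + 1),
               PySem.List.pyGetD rows (PySem.Int.floordiv (cell + (stack.length : Int)) n) [],
               PySem.List.pyGetD cols (PySem.Int.mod (cell + (stack.length : Int)) n) []) :: stack)
             1 cell dl n
         else
           match stack with
           | [] => false
           | (num', rsPrev, csPrev) :: rest =>
             altLoop f
               (PySem.List.pySetD rows (PySem.Int.floordiv (cell + (rest.length : Int)) n) rsPrev)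
               (PySem.List.pySetD cols (PySem.Int.mod (cell + (rest.length : Int)) n) csPrev)
               rest (num' + 1) cell dl n) := rfl

lemma main_loop (cell dl n : Int) (hn : 0 < n) (hc : 0 ≤ cell) :
    ∀ (fuel : Nat) (stack : List (Int × List Int × List Int)) (rows cols : List (List Int)) (next : Int),
      cell + (stack.length : Int) ≤ n * n → 1 ≤ next → next ≤ n + 1 →
      (∀ p ∈ stack, 1 ≤ p.1 ∧ p.1 ≤ n) →
      Mfun cell dl n stack next < fuel →
      altLoop fuel rows cols stack next cell dl n = chainRes cell dl n stack rows cols next := by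
  intro fuel
  induction fuel with
  | zero => intro stack rows cols next _ _ _ _ hM; omega
  | succ f ih =>
    intro stack rows cols next hle h1 h2 hfr hM
    rw [alt_step]
    by_cases hEnd : cell + (stack.length : Int) = n * n
    · rw [if_pos hEnd, chain_step]
      have hF : frameRes rows cols (cell + (stack.length : Int)) dl n next = true := by
        rw [frameRes, if_pos hEnd]
      rw [hF]; rfl
    · rw [if_neg hEnd]
      have hcn : cell + (stack.length : Int) < n * n := lt_of_le_of_ne hle hEnd
      by_cases hdl : cell + (stack.length : Int) < dl
      · simp only [if_pos hdl]
        set sc := altScan rows cols (PySem.Int.floordiv (cell + (stack.length : Int)) n)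
                    (PySem.Int.mod (cell + (stack.length : Int)) n) n next with hsc
        have hscge : next ≤ sc := by rw [hsc]; exact scan_ge _ _ _ _ _ _
        have hrow0 : (0 : Int) ≤ PySem.Int.floordiv (cell + (stack.length : Int)) n := by
          rw [PySem.Int.floordiv_eq_ediv_of_pos hn]
          exact Int.ediv_nonneg (by positivity) (by omega)
        have hcol0 : (0 : Int) ≤ PySem.Int.mod (cell + (stack.length : Int)) n :=
          PySem.Int.mod_nonneg _ hn
        by_cases hscle : sc ≤ n
        · -- push: place sc at the current cell and descend
          rw [if_pos hscle, union_singleton, union_singleton]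
          rw [ih _ _ _ _ (by simp only [List.length_cons]; push_cast; omega) le_rfl (by omega)
                (by intro p hp
                    rcases List.mem_cons.mp hp with h | h
                    · subst h; exact ⟨by omega, hscle⟩
                    · exact hfr p h)
                (by have := Mfun_push cell dl n sc
                          (PySem.List.pyGetD rows (PySem.Int.floordiv (cell + (stack.length : Int)) n) [])
                          (PySem.List.pyGetD cols (PySem.Int.mod (cell + (stack.length : Int)) n) [])
                          stack next hn h1 h2 hscge hscle hdl hcn
                    omega)]
          -- LHS is now chainRes on the pushed stack
          have hndl : ¬ dl ≤ cell + (stack.length : Int) := by omega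
          have hTail : iddfsTry ((n * n - ((cell + (stack.length : Int)) + 1)).toNat + 1) rows cols
                          (cell + (stack.length : Int)) dl n (PySem.List.pyRange (sc + 1) (n + 1) 1)
                      = frameRes rows cols (cell + (stack.length : Int)) dl n (sc + 1) := by
            rw [frameRes, if_neg hEnd, if_neg hndl]
          have hFnext : frameRes rows cols (cell + (stack.length : Int)) dl n next
              = (if frameRes (pushR rows (cell + (stack.length : Int)) n sc)
                             (pushC cols (cell + (stack.length : Int)) n sc)
                             ((cell + (stack.length : Int)) + 1) dl n 1
                 then true
                 else frameRes rows cols (cell + (stack.length : Int)) dl n (sc + 1)) := by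
            rw [frameRes, if_neg hEnd, if_neg hndl, try_scan rows cols _ dl n hcn next, ← hsc,
                if_pos hscle, hTail]
          -- unfold the cons case of chainRes and restore the saved sets
          have hres1 : PySem.List.pySetD (pushR rows (cell + (stack.length : Int)) n sc)
                          (PySem.Int.floordiv (cell + (stack.length : Int)) n)
                          (PySem.List.pyGetD rows (PySem.Int.floordiv (cell + (stack.length : Int)) n) []) = rows := by
            simp only [pushR]
            exact restore_set rows (PySem.Int.floordiv (cell + (stack.length : Int)) n) _ hrow0
          have hres2 : PySem.List.pySetD (pushC cols (cell + (stack.length : Int)) n sc)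
                          (PySem.Int.mod (cell + (stack.length : Int)) n)
                          (PySem.List.pyGetD cols (PySem.Int.mod (cell + (stack.length : Int)) n) []) = cols := by
            simp only [pushC]
            exact restore_set cols (PySem.Int.mod (cell + (stack.length : Int)) n) _ hcol0
          show chainRes cell dl n
              ((sc, PySem.List.pyGetD rows (PySem.Int.floordiv (cell + (stack.length : Int)) n) [],
                    PySem.List.pyGetD cols (PySem.Int.mod (cell + (stack.length : Int)) n) []) :: stack)
              (pushR rows (cell + (stack.length : Int)) n sc)
              (pushC cols (cell + (stack.length : Int)) n sc) 1
            = chainRes cell dl n stack rows cols next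
          rw [chainRes, hres1, hres2]
          rw [show ((cell : Int) + (stack.length : Int) + 1) = ((cell + (stack.length : Int)) + 1) from rfl]
          cases hchild : frameRes (pushR rows (cell + (stack.length : Int)) n sc)
                                  (pushC cols (cell + (stack.length : Int)) n sc)
                                  ((cell + (stack.length : Int)) + 1) dl n 1 with
          | true =>
            rw [chain_step cell dl n stack rows cols next, hFnext]
            simp only [hchild]
            simp
          | false =>
            rw [chain_step cell dl n stack rows cols next,
                chain_step cell dl n stack rows cols (sc + 1), hFnext]
            simp only [hchild]
            simp
        · -- the scan found nothing: backtrack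
          rw [if_neg hscle]
          have hndl : ¬ dl ≤ cell + (stack.length : Int) := by omega
          have hF : frameRes rows cols (cell + (stack.length : Int)) dl n next = false := by
            rw [frameRes, if_neg hEnd, if_neg hndl, try_scan rows cols _ dl n hcn next, ← hsc,
                if_neg hscle]
          rw [chain_step, hF]
          cases stack with
          | nil => rfl
          | cons top rest =>
            obtain ⟨num', rsP, csP⟩ := top
            have hb := hfr (num', rsP, csP) List.mem_cons_self
            exact ih _ _ _ _ (by simp only [List.length_cons] at hle; push_cast at hle ⊢; omega) (by omega) (by omega)
              (fun p hp => hfr p (List.mem_cons_of_mem _ hp))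
              (by have := Mfun_pop cell dl n num' rsP csP rest next; omega)
      · -- depth cutoff: no candidate, backtrack
        simp only [if_neg hdl]
        rw [if_neg (by omega : ¬ (n + 1 ≤ n))]
        have hF : frameRes rows cols (cell + (stack.length : Int)) dl n next = false := by
          rw [frameRes, if_neg hEnd, if_pos (by omega)]
        rw [chain_step, hF]
        cases stack with
        | nil => rfl
        | cons top rest =>
          obtain ⟨num', rsP, csP⟩ := top
          have hb := hfr (num', rsP, csP) List.mem_cons_self
          exact ih _ _ _ _ (by simp only [List.length_cons] at hle; push_cast at hle ⊢; omega) (by omega) (by omega)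
            (fun p hp => hfr p (List.mem_cons_of_mem _ hp))
            (by have := Mfun_pop cell dl n num' rsP csP rest next; omega)

-- ===== VERDICT (by name: the statement is the Claim_ definition above) =====
theorem iddfs_dls_spec : Claim_equal_iddfs_dls := by
  intro grid rs cs cell dl n _hDom hPre
  unfold Spec_iddfs_dls iddfs_dls iddfs_dls_alt
  by_cases h1 : cell = n * n
  · rw [iddfsGo, if_pos h1, if_pos h1]
  · rw [if_neg h1]
    by_cases h2 : dl ≤ cell
    · rw [iddfsGo, if_neg h1, if_pos h2, if_pos h2]
    · rw [if_neg h2]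
      rcases hPre with hP1 | hP2 | hPn | hP4
      · exact absurd hP1 h1
      · exact absurd hP2 h2
      · -- n < 0: the candidate range is empty, both sides are false
        rw [iddfsGo, if_neg h1, if_neg h2,
            PySem.List.pyRange_one_eq_nil (by omega : n + 1 ≤ 1), iddfsTry, alt_step]
        simp only [List.length_nil, Nat.cast_zero, add_zero]
        rw [if_neg h1, if_pos (by omega : cell < dl),
            altScan, dif_neg (by omega : ¬ (1 : Int) ≤ n),
            if_neg (by omega : ¬ (1 : Int) ≤ n)]
      · obtain ⟨hn, hc0, hcle, _hrs, _hcs, _hg, _hgr⟩ := hP4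
        have hclt : cell < n * n := lt_of_le_of_ne hcle h1
        have hcd : cell < min dl (n * n) := by omega
        have hMlt : Mfun cell dl n [] 1
            < 2 * (n.toNat + 2) ^ ((min dl (n * n) - cell).toNat + 1) + 1 := by
          unfold Mfun framesM
          simp only [List.length_nil, Nat.cast_zero, add_zero]
          rw [wB, if_pos (by omega : (0:Int) ≤ min dl (n * n) - cell - 1)]
          set k := (min dl (n * n) - cell - 1).toNat with hk
          have he : (min dl (n * n) - cell).toNat + 1 = k + 2 := by omega
          rw [he]
          have hb1 : (n + 2 - 1).toNat * (n.toNat + 2) ^ k ≤ (n.toNat + 2) ^ (k + 1) := by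
            rw [pow_succ, Nat.mul_comm ((n.toNat + 2) ^ k) (n.toNat + 2)]
            exact Nat.mul_le_mul_right _ (by omega)
          have hb2 : (n.toNat + 2) ^ (k + 1) ≤ (n.toNat + 2) ^ (k + 2) :=
            Nat.pow_le_pow_right (by omega) (by omega)
          omega
        rw [go_eq_frame rs cs cell dl n hcle,
            main_loop cell dl n hn hc0 _ [] rs cs 1 (by simpa using hcle) le_rfl (by omega)
              (by simp) hMlt, chainRes]
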